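-- pv_equiv track=rewrite | github.com/cackichi/syap_labs | lab2/lab2.3.py | count_nonzero_columns
-- ===== SOURCE A (Python) =====
-- def count_nonzero_columns(matrix):
--     count = 0
--     for col in range(len(matrix[0])):
--         flag = False
--         for row in range(len(matrix)):
--             if matrix[row][col] == 0:
--                 flag = True
--                 break
--         if not flag:
--             count += 1
--     return count
-- ===== SOURCE B (Python) =====
-- def count_nonzero_columns(matrix):
--     ncols = len(matrix[0])
--     alive = [True] * ncols
--     for row in matrix:
--         alive = [a and v != 0 for a, v in zip(alive, row)]
--     return sum(alive)
-- ===== Notes on version B (the rewrite author's own statement) =====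
-- stated objective: alternative
-- what changed: Replaces A's nested per-column scan with break by a single row-major pass that folds the rows into one per-column 'no zero seen' boolean vector and sums it.
-- outside the precondition, e.g. on count_nonzero_columns([[0], []]): A returns 0, B returns 0
import Mathlib
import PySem

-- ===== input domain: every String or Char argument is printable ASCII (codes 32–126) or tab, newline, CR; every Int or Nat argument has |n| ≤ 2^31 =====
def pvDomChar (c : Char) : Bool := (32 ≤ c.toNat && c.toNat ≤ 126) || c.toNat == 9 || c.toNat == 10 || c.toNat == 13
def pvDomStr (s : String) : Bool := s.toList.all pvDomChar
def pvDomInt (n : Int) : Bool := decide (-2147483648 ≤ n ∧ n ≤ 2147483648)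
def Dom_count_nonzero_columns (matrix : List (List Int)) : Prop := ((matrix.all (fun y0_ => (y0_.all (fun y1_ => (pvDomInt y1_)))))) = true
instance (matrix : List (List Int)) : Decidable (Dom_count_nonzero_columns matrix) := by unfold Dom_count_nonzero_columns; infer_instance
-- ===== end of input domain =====

-- B changes the traversal: one row-major pass maintaining a per-column boolean vector, instead of A's column-outer loops with break (alternative decomposition, same cost).

-- ===== PORT A =====
-- inner 'for row in range(len(matrix)): if matrix[row][col] == 0: flag = True; break'
def pvAFlag (matrix : List (List Int)) (col : Int) : List Int → Bool
  | [] => false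
  | r :: rs =>
    if PySem.List.pyGetD (PySem.List.pyGetD matrix r []) col 1 = 0 then true
    else pvAFlag matrix col rs

def count_nonzero_columns (matrix : List (List Int)) : Int :=
  (PySem.List.pyRange 0 ((PySem.List.pyGetD matrix 0 []).length : Int) 1).foldl
    (fun count col =>
      if pvAFlag matrix col (PySem.List.pyRange 0 (matrix.length : Int) 1) = true then count
      else count + 1) 0

-- ===== PORT B =====
def count_nonzero_columns_alt (matrix : List (List Int)) : Int :=
  let ncols := (PySem.List.pyGetD matrix 0 []).length
  let alive := matrix.foldl
    (fun alive row => (alive.zip row).map (fun p => p.1 && decide (p.2 ≠ 0)))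
    (List.replicate ncols true)
  alive.foldl (fun s a => s + (if a then 1 else 0)) 0

-- ===== PRECONDITION & SPEC =====
-- Pre_ excludes the empty matrix and ragged matrices with a row shorter than the first row: there A raises
-- IndexError, except in the accidental case that an earlier zero short-circuits every column scan that would
-- have reached the short row (then A returns; this slightly narrows Pre_ beyond its crash reason).
def Pre_count_nonzero_columns (matrix : List (List Int)) : Prop :=
  matrix ≠ [] ∧ ∀ r ∈ matrix, (matrix.headD []).length ≤ r.length
instance (matrix : List (List Int)) : Decidable (Pre_count_nonzero_columns matrix) := by
  unfold Pre_count_nonzero_columns; infer_instance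

def pvWitness_count_nonzero_columns : List (List Int) := [[1, 0], [2, 3]]

def Spec_count_nonzero_columns (matrix : List (List Int)) (out : Int) : Prop := out = count_nonzero_columns_alt matrix
instance (matrix : List (List Int)) (out : Int) : Decidable (Spec_count_nonzero_columns matrix out) := by unfold Spec_count_nonzero_columns; infer_instance

-- ===== CLAIM (what is proved, stated in full; the proofs are below) =====
def Claim_equal_count_nonzero_columns : Prop := ∀ (matrix : List (List Int)), Dom_count_nonzero_columns matrix → Pre_count_nonzero_columns matrix → Spec_count_nonzero_columns matrix (count_nonzero_columns matrix)

-- ===== LEMMAS AND PROOFS =====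

theorem pvAFlag_eq_any (matrix : List (List Int)) (col : Int) (idxs : List Int) :
    pvAFlag matrix col idxs
      = idxs.any (fun r => decide (PySem.List.pyGetD (PySem.List.pyGetD matrix r []) col 1 = 0)) := by
  induction idxs with
  | nil => rfl
  | cons r rs ih =>
    simp only [pvAFlag, List.any_cons]
    split_ifs with h <;> simp [h, ih]

theorem pvAFlag_range (matrix : List (List Int)) (col : Int) :
    pvAFlag matrix col (PySem.List.pyRange 0 (matrix.length : Int) 1)
      = matrix.any (fun row => decide (PySem.List.pyGetD row col 1 = 0)) := by
  rw [pvAFlag_eq_any]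
  conv_rhs => rw [← PySem.List.map_pyGetD_pyRange_zero' matrix ([] : List Int)]
  rw [List.any_map]
  rfl

theorem pvFoldlCountIf {α : Type} (cond : α → Bool) (cols : List α) (s : Int) :
    cols.foldl (fun count col => if cond col = true then count else count + 1) s
      = s + (cols.countP (fun col => !cond col) : Int) := by
  induction cols generalizing s with
  | nil => simp
  | cons c cs ih =>
    simp only [List.foldl_cons, List.countP_cons, ih]
    cases h : cond c <;> simp [h] <;> ring

theorem pvFoldlSumBool (bs : List Bool) (s : Int) :
    bs.foldl (fun s a => s + (if a then 1 else 0)) s = s + (bs.countP id : Int) := by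
  induction bs generalizing s with
  | nil => simp
  | cons b t ih =>
    simp only [List.foldl_cons, List.countP_cons, ih]
    cases b <;> simp <;> ring

theorem pvStep (n : Nat) (f : Nat → Bool) (row : List Int) (hrow : n ≤ row.length) :
    (((List.range n).map f).zip row).map (fun p => p.1 && decide (p.2 ≠ 0))
      = (List.range n).map (fun c => f c && decide (row.getD c 1 ≠ 0)) := by
  apply List.ext_getElem
  · simp [hrow]
  · intro i h1 h2
    have hi : i < n := by simpa using h2
    have hir : i < row.length := lt_of_lt_of_le hi hrow
    simp [List.getElem_zip, List.getElem_map, List.getD_eq_getElem?_getD,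
      List.getElem?_eq_getElem hir]

theorem pvAliveInv (n : Nat) (rows : List (List Int)) (f : Nat → Bool)
    (hlen : ∀ r ∈ rows, n ≤ r.length) :
    rows.foldl (fun alive row => (alive.zip row).map (fun p => p.1 && decide (p.2 ≠ 0)))
        ((List.range n).map f)
      = (List.range n).map (fun c => f c && rows.all (fun row => decide (row.getD c 1 ≠ 0))) := by
  induction rows generalizing f with
  | nil => simp
  | cons row rows ih =>
    simp only [List.foldl_cons]
    rw [pvStep n f row (hlen row (by simp)),
        ih (fun c => f c && decide (row.getD c 1 ≠ 0)) (fun r hr => hlen r (by simp [hr]))]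
    apply List.map_congr_left
    intro c _
    simp [Bool.and_assoc]

theorem count_nonzero_columns_eq (matrix : List (List Int))
    (hpre : Pre_count_nonzero_columns matrix) :
    count_nonzero_columns matrix = count_nonzero_columns_alt matrix := by
  obtain ⟨hne, hlen⟩ := hpre
  set n := (PySem.List.pyGetD matrix 0 []).length with hn
  have hhead : PySem.List.pyGetD matrix 0 [] = matrix.headD [] := by
    cases matrix with
    | nil => simp at hne
    | cons a t => simp [PySem.List.pyGetD_zero_cons]
  have hlen' : ∀ r ∈ matrix, n ≤ r.length := by
    intro r hr; rw [hn, hhead]; exact hlen r hr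
  unfold count_nonzero_columns count_nonzero_columns_alt
  rw [← hn]
  simp only [pvAFlag_range]
  rw [PySem.List.pyRange_zero_natCast, List.foldl_map,
      pvFoldlCountIf (fun (k : Nat) => matrix.any (fun row =>
        decide (PySem.List.pyGetD row (k : Int) 1 = 0))) (List.range n) 0]
  have hrepl : (List.replicate n true) = (List.range n).map (fun _ => true) := by
    simp [List.map_const']
  rw [hrepl, pvAliveInv n matrix (fun _ => true) hlen', pvFoldlSumBool, List.countP_map]
  have hpt : List.countP
        (fun k : Nat => !matrix.any (fun row => decide (PySem.List.pyGetD row (k : Int) 1 = 0)))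
        (List.range n)
      = List.countP (id ∘ fun c => true && matrix.all (fun row => decide (row.getD c 1 ≠ 0)))
        (List.range n) := by
    apply List.countP_congr
    intro k _
    simp [List.all_eq_not_any_not]
  rw [hpt]

-- ===== VERDICT (by name: the statement is the Claim_ definition above) =====
theorem count_nonzero_columns_spec : Claim_equal_count_nonzero_columns := by
  intro matrix _ hpre
  exact count_nonzero_columns_eq matrix hpre
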